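-- pv_equiv track=rewrite | github.com/safespring/web | scripts/translate_page.py | simple_markdown_body_chunks
-- ===== SOURCE A (Python) =====
-- from typing import Optional, Tuple, List
--
-- def is_code_block_fence(line: str) -> bool:
--     """Check if a line is a valid markdown code fence (```) that starts at beginning of line.
--
--     This ensures that only properly formatted code fences are detected and preserved
--     during translation, which helps maintain valid markdown structure.
--
--     A valid code fence must:
--     1. Start with ``` (after optional whitespace)
--     2. Have nothing before the ``` except whitespace
--     3. Be followed only by optional language identifier and whitespace
--     """
--     stripped = line.lstrip()
--     if not stripped.startswith("```"):
--         return False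
--
--     # Extract the part after ```
--     after_ticks = stripped[3:].strip()
--
--     # Should be empty or contain only a language identifier (word characters, hyphens, underscores)
--     return not after_ticks or all(c.isalnum() or c in "-_" for c in after_ticks)
--
-- def simple_markdown_body_chunks(text: str) -> List[Tuple[str, bool]]:
--     """Split Markdown into chunks: (chunk_text, is_translatable).
--
--     We mark fenced code blocks as non-translatable. Everything else is translatable.
--     This is a conservative approach and avoids accidental translation inside code.
--
--     Preserves exact line structure to ensure code fences remain valid.
--     """
--     lines = text.splitlines(keepends=True)
--     chunks: List[Tuple[str, bool]] = []
--     buf: List[str] = []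
--     in_code = False
--     for line in lines:
--         if is_code_block_fence(line):
--             # Flush current buffer with its current mode
--             if buf:
--                 # Join with empty string to preserve exact line endings
--                 chunk_text = "".join(buf)
--                 chunks.append((chunk_text, not in_code))
--                 buf = []
--             # Toggle code mode and include the fence line in its own chunk
--             in_code = not in_code
--             chunks.append((line, False))
--             continue
--         buf.append(line)
--     if buf:
--         # Join with empty string to preserve exact line endings
--         chunk_text = "".join(buf)
--         chunks.append((chunk_text, not in_code))
--     return chunks
-- ===== SOURCE B (Python) =====
-- from typing import List, Tuple
--
-- def is_code_block_fence(line: str) -> bool: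
--     stripped = line.lstrip()
--     if not stripped.startswith("```"):
--         return False
--     after_ticks = stripped[3:].strip()
--     return not after_ticks or all(c.isalnum() or c in "-_" for c in after_ticks)
--
-- def simple_markdown_body_chunks(text: str) -> List[Tuple[str, bool]]:
--     # Span-based scan: no accumulator buffer; each non-fence run is located
--     # with an inner scan and emitted directly as one chunk.
--     lines = text.splitlines(keepends=True)
--     chunks: List[Tuple[str, bool]] = []
--     in_code = False
--     i = 0
--     n = len(lines)
--     while i < n:
--         line = lines[i]
--         if is_code_block_fence(line):
--             chunks.append((line, False))
--             in_code = not in_code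
--             i += 1
--         else:
--             j = i + 1
--             while j < n and not is_code_block_fence(lines[j]):
--                 j += 1
--             chunks.append(("".join(lines[i:j]), not in_code))
--             i = j
--     return chunks
-- ===== Notes on version B (the rewrite author's own statement) =====
-- stated objective: alternative
-- what changed: Replaces A's line-by-line loop with a pending buffer and deferred flushes by a span scan: an inner scan locates each maximal non-fence run, which is sliced and emitted directly as one chunk, with no buffer and no final flush.
import Mathlib
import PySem

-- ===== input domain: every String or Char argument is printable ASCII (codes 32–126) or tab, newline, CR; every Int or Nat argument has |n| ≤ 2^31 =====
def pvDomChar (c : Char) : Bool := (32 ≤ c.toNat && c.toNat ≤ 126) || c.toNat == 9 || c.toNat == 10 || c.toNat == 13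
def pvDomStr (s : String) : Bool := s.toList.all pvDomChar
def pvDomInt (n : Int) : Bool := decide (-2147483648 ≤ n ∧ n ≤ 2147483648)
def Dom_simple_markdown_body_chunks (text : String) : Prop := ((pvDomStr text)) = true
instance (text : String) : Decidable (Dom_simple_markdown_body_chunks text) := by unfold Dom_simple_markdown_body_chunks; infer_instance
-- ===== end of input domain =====

-- B replaces A's buffer-accumulator loop with a span scan (each non-fence run
-- located by an inner scan and emitted directly); objective: alternative decomposition.


-- ===== PORT A =====
-- text.splitlines(keepends=True), ported by hand (PySem.Chars.splitlines drops the
-- line endings): exact on the Dom alphabet, whose only line terminators are \n, \r, \r\n.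
def splitlinesKeep : List Char → List Char → List (List Char)
  | [], acc => if acc.isEmpty then [] else [acc.reverse]
  | '\r' :: '\n' :: rest, acc => (acc.reverse ++ ['\r', '\n']) :: splitlinesKeep rest []
  | '\r' :: rest, acc => (acc.reverse ++ ['\r']) :: splitlinesKeep rest []
  | '\n' :: rest, acc => (acc.reverse ++ ['\n']) :: splitlinesKeep rest []
  | c :: rest, acc => splitlinesKeep rest (c :: acc)

-- is_code_block_fence, shared module helper of both Python versions
def is_code_block_fence (line : List Char) : Bool :=
  let stripped := PySem.Chars.lstrip line
  if !(PySem.Chars.startswith stripped ['`', '`', '`']) then false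
  else
    let after_ticks := PySem.Chars.strip (PySem.Chars.slice stripped (some 3) none)
    after_ticks.isEmpty || after_ticks.all (fun c => PySem.Chars.isalnum c || c == '-' || c == '_')

def stepA (st : List (String × Bool) × List (List Char) × Bool) (line : List Char) :
    List (String × Bool) × List (List Char) × Bool :=
  let (chunks, buf, in_code) := st
  if is_code_block_fence line then
    let chunks := if buf.isEmpty then chunks
                  else chunks ++ [(String.ofList buf.flatten, !in_code)]
    (chunks ++ [(String.ofList line, false)], ([] : List (List Char)), !in_code)
  else (chunks, buf ++ [line], in_code)

-- the final flush of a non-empty buffer (same code as the flush inside the loop)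
def finA (st : List (String × Bool) × List (List Char) × Bool) : List (String × Bool) :=
  let (chunks, buf, in_code) := st
  if buf.isEmpty then chunks else chunks ++ [(String.ofList buf.flatten, !in_code)]

def simple_markdown_body_chunks (text : String) : List (String × Bool) :=
  finA ((splitlinesKeep text.toList []).foldl stepA ([], [], false))

-- ===== PORT B =====
-- Source B's outer while loop; the inner scan for the next fence is the takeWhile/dropWhile pair
def chunksGo : List (List Char) → Bool → List (String × Bool)
  | [], _ => []
  | l :: ls, in_code =>
    if is_code_block_fence l then
      (String.ofList l, false) :: chunksGo ls (!in_code)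
    else
      (String.ofList (l :: ls.takeWhile (fun x => !is_code_block_fence x)).flatten, !in_code) ::
        chunksGo (ls.dropWhile (fun x => !is_code_block_fence x)) in_code
termination_by lines _ => lines.length
decreasing_by
  · simp
  · have := List.length_dropWhile_le (p := fun x => !is_code_block_fence x) (l := ls)
    simp; omega

def simple_markdown_body_chunks_alt (text : String) : List (String × Bool) :=
  chunksGo (splitlinesKeep text.toList []) false

-- ===== PRECONDITION & SPEC =====
def Spec_simple_markdown_body_chunks (text : String) (out : List (String × Bool)) : Prop := out = simple_markdown_body_chunks_alt text
instance (text : String) (out : List (String × Bool)) : Decidable (Spec_simple_markdown_body_chunks text out) := by unfold Spec_simple_markdown_body_chunks; infer_instance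

-- ===== CLAIM (what is proved, stated in full; the proofs are below) =====
def Claim_equal_simple_markdown_body_chunks : Prop := ∀ (text : String), Dom_simple_markdown_body_chunks text → Spec_simple_markdown_body_chunks text (simple_markdown_body_chunks text)

-- ===== LEMMAS AND PROOFS =====

-- A's state after consuming `lines` with pending buffer `buf`, finalized, equals the
-- chunks B still emits: the pending buffer merges with the leading non-fence run.
def pendH (buf : List (List Char)) (ic : Bool) (lines : List (List Char)) : List (String × Bool) :=
  let run := lines.takeWhile (fun x => !is_code_block_fence x)
  let rest := lines.dropWhile (fun x => !is_code_block_fence x)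
  if (buf ++ run).isEmpty then chunksGo rest ic
  else (String.ofList (buf ++ run).flatten, !ic) :: chunksGo rest ic

theorem pendH_nil (ic : Bool) (lines : List (List Char)) :
    pendH [] ic lines = chunksGo lines ic := by
  cases lines with
  | nil => simp [pendH, chunksGo]
  | cons l ls =>
    by_cases h : is_code_block_fence l = true
    · simp [pendH, chunksGo, h]
    · simp only [Bool.not_eq_true] at h
      simp [pendH, chunksGo, h]

theorem foldA_eq_pendH (lines : List (List Char)) :
    ∀ (chunks : List (String × Bool)) (buf : List (List Char)) (ic : Bool),
    finA (lines.foldl stepA (chunks, buf, ic)) = chunks ++ pendH buf ic lines := by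
  induction lines with
  | nil =>
    intro chunks buf ic
    cases buf with
    | nil => simp [finA, pendH, chunksGo]
    | cons b bs => simp [finA, pendH, chunksGo]
  | cons l ls ih =>
    intro chunks buf ic
    rw [List.foldl_cons]
    by_cases h : is_code_block_fence l = true
    · rw [show stepA (chunks, buf, ic) l =
        ((if buf.isEmpty then chunks else chunks ++ [(String.ofList buf.flatten, !ic)]) ++
          [(String.ofList l, false)], ([] : List (List Char)), !ic) by simp [stepA, h]]
      rw [ih, pendH_nil]
      cases buf with
      | nil => simp [pendH, h, chunksGo]
      | cons b bs => simp [pendH, h, chunksGo]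
    · simp only [Bool.not_eq_true] at h
      rw [show stepA (chunks, buf, ic) l = (chunks, buf ++ [l], ic) by simp [stepA, h]]
      rw [ih]
      have hpend : pendH (buf ++ [l]) ic ls = pendH buf ic (l :: ls) := by
        simp [pendH, h]
      rw [hpend]

-- ===== VERDICT (by name: the statement is the Claim_ definition above) =====
theorem simple_markdown_body_chunks_spec : Claim_equal_simple_markdown_body_chunks := by
  intro text _
  unfold Spec_simple_markdown_body_chunks simple_markdown_body_chunks simple_markdown_body_chunks_alt
  rw [foldA_eq_pendH, pendH_nil]
  simp
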